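-- pv_equiv track=rewrite | github.com/mallapraveen/English-Indic-English-Transliteration | src/language_preprocessing.py | clean_Vocab
-- ===== SOURCE A (Python) =====
-- def create_Alphabet_Dict(alphabets) -> dict:
--     return dict([(char, i) for i, char in enumerate(alphabets)])
--
-- def clean_Vocab(line:str, alphabets) -> list:
--     hindi_dic = create_Alphabet_Dict(alphabets)
--     line = line.replace('-', ' ').replace(',', ' ')
--     cleaned_line = ''
--     for char in line:
--         if char in hindi_dic or char == ' ':
--             cleaned_line += char
--     return cleaned_line.split()
-- ===== SOURCE B (Python) =====
-- def clean_Vocab(line: str, alphabets) -> list: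
--     # single-pass tokenizer: separators flush the current token, alphabet chars extend it
--     allowed = set(alphabets)
--     tokens = []
--     current = []
--     for ch in line:
--         if ch in (' ', '-', ','):
--             if current:
--                 tokens.append(''.join(current))
--                 current = []
--         elif ch in allowed:
--             current.append(ch)
--     if current:
--         tokens.append(''.join(current))
--     return tokens
-- ===== Notes on version B (the rewrite author's own statement) =====
-- stated objective: simpler
-- what changed: Replaced A's pipeline (build an index dict, replace '-'/',' by spaces, accumulate a filtered string char by char, then split()) with a single pass over the line that keeps a token buffer and flushes it on the separators ' ', '-', ','; Pre_ excludes lines containing a tab/newline/CR that is itself listed in alphabets, an unspecified corner where A's split() treats the kept whitespace as a separator while B treats it as an ordinary alphabet character.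
-- outside the precondition, e.g. on clean_Vocab('a\tb', ['a', 'b', '\t']): A returns ['a', 'b'], B returns ['a\tb']
import Mathlib
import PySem

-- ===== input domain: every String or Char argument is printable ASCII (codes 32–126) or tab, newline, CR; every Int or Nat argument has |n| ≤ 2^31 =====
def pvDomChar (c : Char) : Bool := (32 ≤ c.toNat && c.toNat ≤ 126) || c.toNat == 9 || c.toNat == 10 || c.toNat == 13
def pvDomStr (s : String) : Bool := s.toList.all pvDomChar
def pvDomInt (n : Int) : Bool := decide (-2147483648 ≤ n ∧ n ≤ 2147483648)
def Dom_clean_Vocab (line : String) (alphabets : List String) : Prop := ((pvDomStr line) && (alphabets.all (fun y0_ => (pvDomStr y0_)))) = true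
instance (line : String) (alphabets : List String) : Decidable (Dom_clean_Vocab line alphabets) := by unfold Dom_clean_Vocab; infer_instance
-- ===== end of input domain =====

-- B replaces A's build-filtered-string-then-split() pipeline (with a dict only used for
-- membership) by a single-pass tokenizer over the line with a token buffer; objective: simpler.

-- ===== PORT A =====
def create_Alphabet_Dict (alphabets : List String) : PySem.Dict String Int :=
  PySem.Dict.ofList ((PySem.List.enumerate alphabets).map (fun p => (p.2, p.1)))

def clean_Vocab (line : String) (alphabets : List String) : List String :=
  let hindi_dic := create_Alphabet_Dict alphabets
  let line2 := PySem.Str.replace (PySem.Str.replace line "-" " ") "," " "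
  let cleaned_line := line2.toList.foldl
    (fun (s : String) c => if hindi_dic.contains (String.ofList [c]) || c == ' ' then s ++ String.ofList [c] else s) ""
  PySem.Str.split₀ cleaned_line

-- ===== PORT B =====
def clean_Vocab_alt (line : String) (alphabets : List String) : List String :=
  let allowed : PySem.Set String := PySem.Set.ofList alphabets
  let st := line.toList.foldl
    (fun (st : List String × List Char) c =>
      if c == ' ' || c == '-' || c == ',' then
        (if st.2.isEmpty then st else (st.1 ++ [String.ofList st.2], []))
      else if allowed.contains (String.ofList [c]) then (st.1, st.2 ++ [c])
      else st)
    ([], [])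
  if st.2.isEmpty then st.1 else st.1 ++ [String.ofList st.2]

-- ===== PRECONDITION & SPEC =====
-- Pre_ excludes lines containing a tab/newline/CR character that is itself listed in alphabets:
-- A keeps such a character and then split() also splits on it, while B treats it as an ordinary
-- alphabet character — an unspecified corner where either value is defensible.
def Pre_clean_Vocab (line : String) (alphabets : List String) : Prop :=
  (line.toList.all (fun c =>
    !(PySem.Chars.isspace c) || c == ' ' || !(alphabets.contains (String.ofList [c])))) = true
instance (line : String) (alphabets : List String) : Decidable (Pre_clean_Vocab line alphabets) := by unfold Pre_clean_Vocab; infer_instance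

def pvWitness_clean_Vocab : String × List String := ("ab-cd, x!y", ["a", "b", "c", "x", "y"])

def Spec_clean_Vocab (line : String) (alphabets : List String) (out : List String) : Prop := out = clean_Vocab_alt line alphabets
instance (line : String) (alphabets : List String) (out : List String) : Decidable (Spec_clean_Vocab line alphabets out) := by unfold Spec_clean_Vocab; infer_instance

-- ===== CLAIM (what is proved, stated in full; the proofs are below) =====
def Claim_equal_clean_Vocab : Prop := ∀ (line : String) (alphabets : List String), Dom_clean_Vocab line alphabets → Pre_clean_Vocab line alphabets → Spec_clean_Vocab line alphabets (clean_Vocab line alphabets)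

-- ===== LEMMAS AND PROOFS =====

-- the two single-char replaces act as a character map
def pvSubst (c : Char) : Char := if c = '-' ∨ c = ',' then ' ' else c

theorem pvReplaceGo_single (a b : Char) :
    ∀ (fuel : Nat) (l acc : List Char), l.length ≤ fuel →
      PySem.Chars.replace.go [a] [b] fuel l acc
        = acc.reverse ++ l.map (fun c => if c = a then b else c) := by
  intro fuel
  induction fuel with
  | zero =>
      intro l acc h
      have : l = [] := List.length_eq_zero_iff.mp (Nat.le_zero.mp h)
      subst this; simp [PySem.Chars.replace.go]
  | succ n ih =>
      intro l acc h
      cases l with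
      | nil => simp [PySem.Chars.replace.go]
      | cons c t =>
          simp only [PySem.Chars.replace.go]
          by_cases hc : c = a
          · subst hc
            have hp : List.isPrefixOf [c] (c :: t) = true := by simp [List.isPrefixOf]
            rw [if_pos hp]
            have ht : t.length ≤ n := by simpa using h
            rw [show List.drop [c].length (c :: t) = t from by simp, ih _ _ ht]
            simp
          · have hp : List.isPrefixOf [a] (c :: t) = false := by
              simp [List.isPrefixOf]; exact fun h' => (hc h'.symm).elim
            rw [if_neg (by simp [hp])]
            have ht : t.length ≤ n := by simpa using h
            rw [ih _ _ ht]
            simp [hc]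

theorem pvReplace_single (a b : Char) (l : List Char) :
    PySem.Chars.replace l [a] [b] = l.map (fun c => if c = a then b else c) := by
  simp only [PySem.Chars.replace]
  rw [if_neg (by simp)]
  exact pvReplaceGo_single a b l.length l [] (le_refl _)

theorem pvReplaced_toList (line : String) :
    (PySem.Str.replace (PySem.Str.replace line "-" " ") "," " ").toList
      = line.toList.map pvSubst := by
  simp only [PySem.Str.replace, String.toList_ofList]
  have h1 : ("-" : String).toList = ['-'] := rfl
  have h2 : ("," : String).toList = [','] := rfl
  have h3 : (" " : String).toList = [' '] := rfl
  rw [h1, h2, h3, pvReplace_single, pvReplace_single, List.map_map]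
  apply List.map_congr_left
  intro c _
  simp only [Function.comp, pvSubst]
  by_cases hc : c = '-' <;> by_cases hc' : c = ',' <;> simp_all

-- the string-accumulating filter loop of A, seen on character lists
theorem pvFoldFilter (q : Char → Bool) :
    ∀ (l : List Char) (s : String),
      (l.foldl (fun (s : String) c => if q c then s ++ String.ofList [c] else s) s).toList
        = s.toList ++ l.filter q := by
  intro l
  induction l with
  | nil => intro s; simp
  | cons c t ih =>
      intro s
      by_cases hq : q c
      · simp [List.foldl_cons, hq, ih, List.filter_cons]
      · simp [List.foldl_cons, hq, ih, List.filter_cons]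

-- second components of enumerate give back the list
theorem pvEnumerate_snd (alphabets : List String) :
    ∀ (start : Int), (PySem.List.enumerate alphabets start).map (·.2) = alphabets := by
  induction alphabets with
  | nil => intro s; simp [PySem.List.enumerate]
  | cons x t ih => intro s; simp [PySem.List.enumerate, ih]

-- membership in A's dict = membership in alphabets
theorem pvDictContains (alphabets : List String) (k : String) :
    (create_Alphabet_Dict alphabets).contains k = decide (k ∈ alphabets) := by
  rw [PySem.Dict.contains_eq_decide_mem_keys]
  congr 1
  simp only [eq_iff_iff]
  have hkeys : (create_Alphabet_Dict alphabets).keys = PySem.Set.ofList alphabets := by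
    show (PySem.Dict.ofList _).keys = _
    simp only [PySem.Dict.ofList, PySem.Dict.update]
    rw [PySem.Dict.keys_foldl_insert_key _ Prod.fst (fun _ x => x.2)]
    have : ((PySem.List.enumerate alphabets 0).map (fun p => (p.2, p.1))).map Prod.fst
        = alphabets := by
      rw [List.map_map]
      exact pvEnumerate_snd alphabets 0
    rw [this]
    exact PySem.Set.update_nil_left alphabets
  rw [hkeys]
  exact PySem.Set.mem_ofList alphabets k

-- B's set membership = membership in alphabets
theorem pvSetContains (alphabets : List String) (k : String) :
    (PySem.Set.ofList alphabets).contains k = decide (k ∈ alphabets) := by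
  simp only [PySem.Set.contains]
  simp [PySem.Set.mem_ofList]

-- split₀.go accumulates its acc in front
theorem pvGoAppend :
    ∀ (l cur : List Char) (acc : List (List Char)),
      PySem.Chars.split₀.go l cur acc = acc.reverse ++ PySem.Chars.split₀.go l cur [] := by
  intro l
  induction l with
  | nil =>
      intro cur acc
      by_cases h : cur.isEmpty <;> simp [PySem.Chars.split₀.go, h]
  | cons c t ih =>
      intro cur acc
      simp only [PySem.Chars.split₀.go]
      by_cases hs : PySem.Chars.isspace c
      · by_cases hc : cur.isEmpty
        · simp only [hs, hc, if_true]
          exact ih [] acc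
        · simp only [hs, hc, if_true, if_false, Bool.false_eq_true]
          rw [ih _ (cur.reverse :: acc), ih _ [cur.reverse]]
          simp
      · simp only [hs, Bool.false_eq_true, if_false]
        exact ih _ acc

-- the heart of the proof: B's one-pass fold = split₀ of the filtered, substituted list,
-- provided no whitespace character other than ' ' in the line is accepted by p
theorem pvMain (p : Char → Bool) :
    ∀ (l : List Char) (toks : List String) (cur : List Char),
      (∀ c ∈ l, PySem.Chars.isspace c = true → c = ' ' ∨ p c = false) →
      (let st := l.foldl
        (fun (st : List String × List Char) c =>
          if c == ' ' || c == '-' || c == ',' then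
            (if st.2.isEmpty then st else (st.1 ++ [String.ofList st.2], []))
          else if p c then (st.1, st.2 ++ [c])
          else st)
        (toks, cur)
       if st.2.isEmpty then st.1 else st.1 ++ [String.ofList st.2])
      = toks ++ (PySem.Chars.split₀.go
          ((l.map pvSubst).filter (fun c => p c || c == ' ')) cur.reverse []).map String.ofList := by
  intro l
  induction l with
  | nil =>
      intro toks cur _
      cases cur with
      | nil => simp [PySem.Chars.split₀.go]
      | cons a b => simp [PySem.Chars.split₀.go]
  | cons c t ih =>
      intro toks cur hyp
      have hhead := hyp c (List.mem_cons_self)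
      have htail : ∀ c' ∈ t, PySem.Chars.isspace c' = true → c' = ' ' ∨ p c' = false :=
        fun c' hm => hyp c' (List.mem_cons_of_mem _ hm)
      simp only [List.map_cons, List.foldl_cons]
      by_cases hsep : (c == ' ' || c == '-' || c == ',') = true
      · -- separator character: pvSubst maps it to ' ', which is kept and splits
        have hsub : pvSubst c = ' ' := by
          unfold pvSubst
          rcases Bool.or_eq_true_iff.mp hsep with h | h
          · rcases Bool.or_eq_true_iff.mp h with h' | h'
            · simp [beq_iff_eq.mp h']
            · simp [beq_iff_eq.mp h']
          · simp [beq_iff_eq.mp h]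
        have hkeep : (p (pvSubst c) || pvSubst c == ' ') = true := by simp [hsub]
        rw [if_pos hsep]
        rw [List.filter_cons, if_pos hkeep, hsub]
        simp only [PySem.Chars.split₀.go, show PySem.Chars.isspace ' ' = true from by decide, if_true]
        rcases eq_or_ne cur [] with hcur | hcur
        · subst hcur
          simp only [List.isEmpty_nil, if_true, List.reverse_nil]
          exact ih toks [] htail
        · have hne : ¬ (cur.isEmpty = true) := by simpa using hcur
          have hner : ¬ (cur.reverse.isEmpty = true) := by simpa using hcur
          rw [if_neg hne, if_neg hner, ih (toks ++ [String.ofList cur]) [] htail,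
              pvGoAppend _ [] [cur.reverse.reverse]]
          simp
      · rw [if_neg hsep]
        have hnsp : c ≠ ' ' ∧ c ≠ '-' ∧ c ≠ ',' := by
          simp only [Bool.or_eq_true_iff, not_or, beq_iff_eq] at hsep
          exact ⟨hsep.1.1, hsep.1.2, hsep.2⟩
        have hc : pvSubst c = c := by
          unfold pvSubst; simp [hnsp.2.1, hnsp.2.2]
        rw [hc]
        by_cases hp : p c
        · -- kept, non-space letter: by the hypothesis it cannot be whitespace
          have hwsf : PySem.Chars.isspace c = false := by
            by_cases hss : PySem.Chars.isspace c
            · rcases hhead hss with h | h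
              · exact absurd h hnsp.1
              · exact absurd hp (by simp [h])
            · simpa using hss
          have hkeep2 : (p c || c == ' ') = true := by simp [hp]
          rw [if_pos hp]
          rw [List.filter_cons, if_pos hkeep2]
          simp only [PySem.Chars.split₀.go, hwsf, Bool.false_eq_true, if_false]
          have : c :: cur.reverse = (cur ++ [c]).reverse := by simp
          rw [this]
          exact ih toks (cur ++ [c]) htail
        · -- dropped character
          have hdrop : ¬ ((p c || c == ' ') = true) := by simp [hp, hnsp.1]
          rw [if_neg hp]
          rw [List.filter_cons, if_neg hdrop]
          exact ih toks cur htail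

-- ===== VERDICT (by name: the statement is the Claim_ definition above) =====
theorem clean_Vocab_spec : Claim_equal_clean_Vocab := by
  intro line alphabets _ hpre
  show clean_Vocab line alphabets = clean_Vocab_alt line alphabets
  unfold clean_Vocab clean_Vocab_alt
  simp only []
  set p : Char → Bool := fun c => decide ((String.ofList [c]) ∈ alphabets) with hp
  have hA' : ∀ c, (create_Alphabet_Dict alphabets).contains (String.ofList [c]) = p c := by
    intro c; exact pvDictContains alphabets (String.ofList [c])
  have hB : ∀ c, (PySem.Set.ofList alphabets).contains (String.ofList [c]) = p c := by
    intro c; exact pvSetContains alphabets (String.ofList [c])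
  simp only [hA', hB]
  rw [PySem.Str.split₀]
  rw [pvFoldFilter (fun c => p c || c == ' ')]
  rw [pvReplaced_toList]
  have hyp : ∀ c ∈ line.toList, PySem.Chars.isspace c = true → c = ' ' ∨ p c = false := by
    rw [Pre_clean_Vocab, List.all_eq_true] at hpre
    intro c hm hs
    have h := hpre c hm
    simp only [hs, Bool.not_true, Bool.false_or, Bool.or_eq_true, beq_iff_eq,
      Bool.not_eq_true', List.contains_eq_mem, decide_eq_false_iff_not] at h
    rcases h with h | h
    · exact Or.inl h
    · exact Or.inr (by simp [hp, h])
  have := pvMain p line.toList [] [] hyp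
  simp only [List.reverse_nil] at this
  rw [this]
  simp [PySem.Chars.split₀]
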